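-- pv_equiv track=rewrite | github.com/manu-palmero/apuntes | public/Estudios/Universidad/Programación/1/Python/Tarea/1---Interacción-con-el-Usuario-en-Python/Código/15.py | tres
-- ===== SOURCE A (Python) =====
-- def cadenaPositivaDeUnNum(
--     n: int,
-- ):  # Función que devuelve una cadena que contiene un número positivo a pesar de que sea negativo, se utilizará para contar la cantidad de caracteres sin que moleste el signo
--     c: str
--     if n < 0:
--         n = n + (-n * 2)
--         c = str(n)
--     else:
--         c = str(n)
--     return n, c
--
-- def tres(
--     n: int,
-- ) -> bool:  # Función que comprueba si el número ingresado es divisible por tres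
--     n, c = cadenaPositivaDeUnNum(n)
--     l = len(c)
--     a = 0
--     for i in range(0, l):
--         a = a + int(c[i])
--     if a % 3 == 0:
--         return True
--     else:
--         return False
-- ===== SOURCE B (Python) =====
-- def tres(n: int) -> bool:
--     return n % 3 == 0
-- ===== Notes on version B (the rewrite author's own statement) =====
-- stated objective: simpler
-- what changed: Replaced the string conversion and per-digit summation loop with Python's direct modulo divisibility test, exact because an integer and its digit sum leave the same remainder modulo three.
import Mathlib
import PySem

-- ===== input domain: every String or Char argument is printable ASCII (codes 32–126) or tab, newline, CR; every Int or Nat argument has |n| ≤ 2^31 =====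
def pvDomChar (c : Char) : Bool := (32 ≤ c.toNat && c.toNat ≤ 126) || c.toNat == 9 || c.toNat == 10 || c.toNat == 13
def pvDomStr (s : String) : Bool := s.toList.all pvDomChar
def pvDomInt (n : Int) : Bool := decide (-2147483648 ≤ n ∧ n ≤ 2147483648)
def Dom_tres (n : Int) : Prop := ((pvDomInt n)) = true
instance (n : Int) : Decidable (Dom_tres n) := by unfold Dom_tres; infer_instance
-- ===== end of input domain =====

-- B replaces A's string/digit-sum loop with the direct modulo divisibility test (simpler; exact).

-- ===== PORT A =====
def cadenaPositivaDeUnNum (n : Int) : Int × String :=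
  if n < 0 then
    let n' := n + (-n * 2)
    (n', PySem.Int.toStr n')
  else
    (n, PySem.Int.toStr n)

def tres (n : Int) : Bool :=
  let nc := cadenaPositivaDeUnNum n
  let c := nc.2
  let l := PySem.Str.len c
  let a := (PySem.List.pyRange 0 l 1).foldl
    (fun a i =>
      -- int(c[i]): index is always in range and the char is a digit, so the
      -- none branches (IndexError/ValueError) are unreachable on these inputs
      a + (match PySem.Str.pyGet? c i with
           | some ch => (PySem.Int.ofStr? (String.mk [ch])).getD 0
           | none => 0)) 0
  if PySem.Int.mod a 3 == 0 then true else false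

-- ===== PORT B =====
def tres_alt (n : Int) : Bool := PySem.Int.mod n 3 == 0

-- ===== PRECONDITION & SPEC =====
def Spec_tres (n : Int) (out : Bool) : Prop := out = tres_alt n
instance (n : Int) (out : Bool) : Decidable (Spec_tres n out) := by unfold Spec_tres; infer_instance

-- ===== CLAIM (what is proved, stated in full; the proofs are below) =====
def Claim_equal_tres : Prop := ∀ (n : Int), Dom_tres n → Spec_tres n (tres n)

-- ===== LEMMAS AND PROOFS =====

-- value A's loop body extracts from one character
def pvCharVal (ch : Char) : Int := (PySem.Int.ofStr? (String.mk [ch])).getD 0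

theorem pvCharVal_digitChar (d : ℕ) (hd : d < 10) :
    pvCharVal (Nat.digitChar d) = (d : Int) := by
  interval_cases d <;> decide

-- the digit-character sum of Nat.toDigitsCore agrees with the number mod 3
theorem toDigitsCore_sum_mod3 (f : ℕ) : ∀ (n : ℕ) (ds : List Char), n < f →
    ((Nat.toDigitsCore 10 f n ds).map pvCharVal).sum % 3
      = ((n : Int) + ((ds.map pvCharVal).sum)) % 3 := by
  induction f with
  | zero => intro n ds h; omega
  | succ f ih =>
    intro n ds h
    rw [Nat.toDigitsCore]
    by_cases h0 : n / 10 = 0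
    · simp only [h0, if_true, List.map_cons, List.sum_cons]
      rw [pvCharVal_digitChar _ (Nat.mod_lt _ (by norm_num))]
      have : n % 10 = n := by omega
      rw [this]
    · rw [if_neg h0]
      have hlt : n / 10 < f := by
        have : n / 10 < n := Nat.div_lt_self (by omega) (by norm_num)
        omega
      rw [ih (n / 10) _ hlt]
      simp only [List.map_cons, List.sum_cons]
      rw [pvCharVal_digitChar _ (Nat.mod_lt _ (by norm_num))]
      have hdm : 10 * (n / 10) + n % 10 = n := Nat.div_add_mod n 10
      push_cast
      omega

theorem toDigits_sum_mod3 (n : ℕ) :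
    ((Nat.toDigits 10 n).map pvCharVal).sum % 3 = (n : Int) % 3 := by
  have := toDigitsCore_sum_mod3 (n + 1) n [] (Nat.lt_succ_self n)
  simpa [Nat.toDigits] using this

-- A's index loop over a prefix of the string equals the char-value sum of that prefix
theorem loop_eq (c : String) (k : ℕ) (hk : k ≤ c.toList.length) (a : Int) :
    (PySem.List.pyRange 0 (k : Int) 1).foldl
      (fun a i =>
        a + (match PySem.Str.pyGet? c i with
             | some ch => (PySem.Int.ofStr? (String.mk [ch])).getD 0
             | none => 0)) a
      = a + (((c.toList.take k).map pvCharVal).sum) := by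
  induction k generalizing a with
  | zero => simp [PySem.List.pyRange_one_eq_nil]
  | succ k ih =>
    have hk' : k ≤ c.toList.length := Nat.le_of_succ_le hk
    have : ((k : Int) + 1) = ((k + 1 : ℕ) : Int) := by push_cast; ring
    rw [show ((k + 1 : ℕ) : Int) = (k : Int) + 1 by push_cast; ring,
        PySem.List.pyRange_one_succ_right (by positivity)]
    rw [List.foldl_append, ih hk']
    have hget : PySem.Str.pyGet? c (k : Int) = c.toList[k]? := PySem.Str.pyGet?_natCast c k
    have hkl : k < c.toList.length := hk
    rw [List.take_add_one]
    simp only [hget, List.getElem?_eq_getElem hkl, Option.toList_some, List.map_append,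
      List.map_cons, List.map_nil, List.sum_append, List.sum_cons, List.sum_nil,
      List.foldl_cons, List.foldl_nil, pvCharVal]
    ring

-- A's whole loop on str(m), for m ≥ 0, agrees with m mod 3
theorem loopsum_mod3 (m : Int) (hm : 0 ≤ m) :
    ((PySem.List.pyRange 0 (PySem.Str.len (PySem.Int.toStr m)) 1).foldl
      (fun a i =>
        a + (match PySem.Str.pyGet? (PySem.Int.toStr m) i with
             | some ch => (PySem.Int.ofStr? (String.mk [ch])).getD 0
             | none => 0)) 0) % 3 = m % 3 := by
  set c := PySem.Int.toStr m with hc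
  rw [PySem.Str.len_eq, loop_eq c c.toList.length le_rfl 0]
  have htl : c.toList = Nat.toDigits 10 m.toNat := by
    rw [hc, PySem.Int.toList_toStr, PySem.Int.toChars, if_neg (by omega)]
  rw [List.take_length, htl, zero_add, toDigits_sum_mod3]
  simp [Int.toNat_of_nonneg hm]

theorem pymod3 (a : Int) : PySem.Int.mod a 3 = a % 3 := by
  show a.fmod 3 = a % 3
  rw [Int.fmod_eq_emod, if_pos (Or.inl (by norm_num)), add_zero]

-- ===== VERDICT (by name: the statement is the Claim_ definition above) =====
theorem tres_spec : Claim_equal_tres := by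
  intro n _
  unfold Spec_tres tres tres_alt cadenaPositivaDeUnNum
  by_cases hneg : n < 0
  · simp only [if_pos hneg]
    rw [show n + -n * 2 = -n by ring]
    rw [pymod3, pymod3, loopsum_mod3 (-n) (by omega)]
    by_cases h3 : n % 3 = 0
    · simp [h3, show (-n) % 3 = 0 by omega]
    · simp [h3, show (-n) % 3 ≠ 0 by omega]
  · simp only [if_neg hneg]
    rw [pymod3, pymod3, loopsum_mod3 n (by omega)]
    cases h : (n % 3 == 0) <;> simp [h]
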